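-- pv_equiv track=rewrite | github.com/alai22/halo-insight | backend/services/jira_client.py | _filter_issues_under_ancestor
-- ===== SOURCE A (Python) =====
-- from typing import List, Dict, Any, Optional, Tuple
--
-- def _filter_issues_under_ancestor(issues: List[Dict[str, Any]], ancestor_key: str) -> List[Dict[str, Any]]:
--     """
--     Keep only issues that are the ancestor_key itself or a descendant (child, grandchild, etc.).
--     ancestor_key is the root issue key (e.g. HALO-23306). Uses parentKey on each issue.
--     """
--     if not ancestor_key or not issues:
--         return issues
--     ancestor_key = ancestor_key.strip().upper()
--     # Case-insensitive lookup by normalized key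
--     key_to_issue = {((i.get('key') or '').upper()): i for i in issues}
--
--     def is_under_ancestor(issue: Dict[str, Any]) -> bool:
--         current = issue
--         seen = set()
--         while current:
--             k = (current.get('key') or '').upper()
--             if k == ancestor_key:
--                 return True
--             if k in seen:
--                 break
--             seen.add(k)
--             parent_k = (current.get('parentKey') or '').strip().upper()
--             if not parent_k:
--                 return False
--             current = key_to_issue.get(parent_k)
--             if not current:
--                 # Parent not in fetched set; can't confirm
--                 return False
--         return False
--
--     return [i for i in issues if is_under_ancestor(i)]
-- ===== SOURCE B (Python) =====
-- def _filter_issues_under_ancestor(issues, ancestor_key):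
--     if not ancestor_key or not issues:
--         return issues
--     anc = ancestor_key.strip().upper()
--     # one pass: normalized key -> normalized parent key (last occurrence wins)
--     parent_of = {}
--     for i in issues:
--         parent_of[(i.get('key') or '').upper()] = (i.get('parentKey') or '').strip().upper()
--     # reverse index: parent -> child keys
--     children = {}
--     for k, p in parent_of.items():
--         if p:
--             children.setdefault(p, []).append(k)
--     # one downward BFS from the ancestor marks every key whose parent chain reaches it
--     reach = set()
--     if anc in parent_of:
--         reach.add(anc)
--         stack = [anc]
--         while stack:
--             u = stack.pop()
--             for c in children.get(u, ()):
--                 if c not in reach: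
--                     reach.add(c)
--                     stack.append(c)
--
--     def keep(issue):
--         if (issue.get('key') or '').upper() == anc:
--             return True
--         p = (issue.get('parentKey') or '').strip().upper()
--         return bool(p) and p in reach
--
--     return [i for i in issues if keep(i)]
-- ===== Notes on version B (the rewrite author's own statement) =====
-- stated objective: alternative
-- what changed: A climbs the parentKey chain upward separately for every issue; B builds a parent->children reverse index once, marks every key whose chain reaches the ancestor by one downward BFS, then keeps each issue by a single set lookup. Pre_ excludes lists where two issues share a nonempty normalized key (A's last-wins dict rebinding vs each duplicate's own parentKey is accidental tie-breaking) and lists containing the empty issue dict together with a whitespace-only ancestor key (A silently drops the falsy dict via its while-truthiness test).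
import Mathlib
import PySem

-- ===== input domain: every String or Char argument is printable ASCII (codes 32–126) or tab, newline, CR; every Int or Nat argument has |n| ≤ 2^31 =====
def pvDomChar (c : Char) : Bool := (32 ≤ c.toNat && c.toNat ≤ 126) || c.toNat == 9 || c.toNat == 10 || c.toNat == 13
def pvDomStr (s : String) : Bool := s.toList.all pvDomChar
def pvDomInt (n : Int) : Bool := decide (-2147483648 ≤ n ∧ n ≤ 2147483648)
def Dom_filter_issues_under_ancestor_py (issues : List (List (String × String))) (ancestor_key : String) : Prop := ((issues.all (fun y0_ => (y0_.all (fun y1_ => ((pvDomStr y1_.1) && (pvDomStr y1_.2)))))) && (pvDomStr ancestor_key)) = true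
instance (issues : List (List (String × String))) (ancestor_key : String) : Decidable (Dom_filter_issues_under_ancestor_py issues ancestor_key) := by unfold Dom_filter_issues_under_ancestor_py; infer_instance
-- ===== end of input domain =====

-- B replaces A's per-issue upward climb along parentKey chains by one downward BFS from the
-- ancestor over a reverse (parent → children) index, then a single keep-pass with set lookups.

-- ===== PORT A =====

-- (i.get('key') or '') : dict lookup with '' for missing; '' stays '' under `or`
def pvGet (i : List (String × String)) (k : String) : String :=
  ((PySem.Dict.mk i).get? k).getD ""

-- ((i.get('key') or '').upper())
def pvNormKey (i : List (String × String)) : String :=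
  PySem.Str.upper (pvGet i "key")

-- ((i.get('parentKey') or '').strip().upper())
def pvNormParent (i : List (String × String)) : String :=
  PySem.Str.upper (PySem.Str.strip (pvGet i "parentKey"))

-- key_to_issue = {((i.get('key') or '').upper()): i for i in issues}
def pvD (issues : List (List (String × String))) : PySem.Dict String (List (String × String)) :=
  issues.foldl (fun acc i => acc.insert (pvNormKey i) i) PySem.Dict.empty

-- the `while current:` loop of is_under_ancestor; fuel issues.length+1 is enough:
-- every non-returning iteration adds a fresh key (all of them keys of d) to seen
def pvClimbA (d : PySem.Dict String (List (String × String))) (anc : String) :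
    Nat → List (String × String) → PySem.Set String → Bool
  | 0, _, _ => false
  | fuel+1, current, seen =>
    if current = [] then false                       -- while current … else return False
    else
      let k := pvNormKey current
      if k = anc then true
      else if PySem.Set.contains seen k then false   -- if k in seen: break → return False
      else
        let seen' := PySem.Set.add seen k
        let p := pvNormParent current
        if p = "" then false                         -- if not parent_k: return False
        else
          match d.get? p with
          | none => false                            -- if not current: return False (missing)
          | some c => pvClimbA d anc fuel c seen'   -- loop re-entry; `while current` is the `current = []` test above

def filter_issues_under_ancestor_py (issues : List (List (String × String))) (ancestor_key : String) : List (List (String × String)) :=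
  if ancestor_key = "" ∨ issues = [] then issues
  else
    let anc := PySem.Str.upper (PySem.Str.strip ancestor_key)
    let d := pvD issues
    issues.filter (fun i => pvClimbA d anc (issues.length + 1) i PySem.Set.empty)

-- ===== PORT B =====

-- parent_of: normalized key -> normalized parentKey, last occurrence wins
def pvInfo (issues : List (List (String × String))) : PySem.Dict String String :=
  issues.foldl (fun acc i => acc.insert (pvNormKey i) (pvNormParent i)) PySem.Dict.empty

-- children.setdefault(p, []).append(k) for every (k, p) with nonempty p
def pvChildren (info : PySem.Dict String String) : PySem.Dict String (List String) :=
  info.items.foldl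
    (fun acc kv => if kv.2 ≠ "" then acc.modify kv.2 [] (· ++ [kv.1]) else acc)
    PySem.Dict.empty

-- the `while stack:` BFS loop; stack.pop() takes the last element
def pvBfs (children : PySem.Dict String (List String)) :
    Nat → List String → PySem.Set String → PySem.Set String
  | 0, _, s => s
  | fuel+1, stack, s =>
    match stack.getLast? with
    | none => s
    | some u =>
      let st := stack.dropLast
      let r := (children.getD u []).foldl
        (fun acc c => if PySem.Set.contains acc.1 c then acc else (PySem.Set.add acc.1 c, acc.2 ++ [c]))
        (s, st)
      pvBfs children fuel r.2 r.1

def filter_issues_under_ancestor_py_alt (issues : List (List (String × String))) (ancestor_key : String) : List (List (String × String)) :=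
  if ancestor_key = "" ∨ issues = [] then issues
  else
    let anc := PySem.Str.upper (PySem.Str.strip ancestor_key)
    let info := pvInfo issues
    let children := pvChildren info
    let reach : PySem.Set String :=
      match info.get? anc with
      | some _ => pvBfs children (issues.length + 1) [anc] (PySem.Set.add PySem.Set.empty anc)
      | none => PySem.Set.empty
    issues.filter (fun i =>
      if pvNormKey i = anc then true
      else decide (pvNormParent i ≠ "") && PySem.Set.contains reach (pvNormParent i))

-- ===== PRECONDITION & SPEC =====
-- Pre_ excludes (a) lists in which two issues share the same nonempty normalized key: there A's
-- last-wins dict reinsertion silently rebinds the key while each duplicate still climbs from its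
-- own parentKey, an accidental tie-breaking no caller would specify; and (b) lists containing the
-- empty issue dict together with an ancestor key that strips to empty: there A's `while current:`
-- truthiness test silently drops the falsy dict, which B has no reason to single out.
def Pre_filter_issues_under_ancestor_py (issues : List (List (String × String))) (ancestor_key : String) : Prop :=
  ((issues.map pvNormKey).filter (fun k => k ≠ "")).Nodup ∧
  ([] ∈ issues → PySem.Str.upper (PySem.Str.strip ancestor_key) ≠ "")

instance (issues : List (List (String × String))) (ancestor_key : String) : Decidable (Pre_filter_issues_under_ancestor_py issues ancestor_key) := by unfold Pre_filter_issues_under_ancestor_py; infer_instance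

def pvWitness_filter_issues_under_ancestor_py : (List (List (String × String))) × String :=
  ([[("key", "A"), ("parentKey", "")], [("key", "B"), ("parentKey", "a")], [("key", "C"), ("parentKey", "B")]], "a")

def Spec_filter_issues_under_ancestor_py (issues : List (List (String × String))) (ancestor_key : String) (out : List (List (String × String))) : Prop := out = filter_issues_under_ancestor_py_alt issues ancestor_key
instance (issues : List (List (String × String))) (ancestor_key : String) (out : List (List (String × String))) : Decidable (Spec_filter_issues_under_ancestor_py issues ancestor_key out) := by unfold Spec_filter_issues_under_ancestor_py; infer_instance

-- ===== CLAIM (what is proved, stated in full; the proofs are below) =====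
def Claim_equal_filter_issues_under_ancestor_py : Prop := ∀ (issues : List (List (String × String))) (ancestor_key : String), Dom_filter_issues_under_ancestor_py issues ancestor_key → Pre_filter_issues_under_ancestor_py issues ancestor_key → Spec_filter_issues_under_ancestor_py issues ancestor_key (filter_issues_under_ancestor_py issues ancestor_key)

-- ===== LEMMAS AND PROOFS =====

theorem pvNormKey_nil : pvNormKey [] = "" := by decide
theorem pvNormParent_nil : pvNormParent [] = "" := by decide

-- the deterministic hop relation both programs walk
def pvHop (d : PySem.Dict String (List (String × String))) (cur : List (String × String)) : Option String :=
  if cur = [] then none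
  else
    let p := pvNormParent cur
    if p = "" then none
    else
      match d.get? p with
      | none => none
      | some w => if w = [] then none else some p

def pvStep (d : PySem.Dict String (List (String × String))) (k : String) : Option String :=
  (d.get? k).bind (pvHop d)

def pvPath (d : PySem.Dict String (List (String × String))) : Nat → String → Option String
  | 0, k => some k
  | m+1, k => match pvStep d k with | some p => pvPath d m p | none => none

def pvValid (d : PySem.Dict String (List (String × String))) (k : String) : Prop :=
  ∃ v, d.get? k = some v ∧ v ≠ []

def pvGood (d : PySem.Dict String (List (String × String))) (anc : String) (k : String) : Prop :=
  pvValid d k ∧ ∃ m, pvPath d m k = some anc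

-- last-wins lookup characterisation of a foldl-insert dict
theorem pvGet?_foldl_insert {α ν : Type} (l : List α) (key : α → String) (f : α → ν)
    (d0 : PySem.Dict String ν) (k : String) :
    (l.foldl (fun d a => d.insert (key a) (f a)) d0).get? k =
      (match l.reverse.find? (fun a => key a == k) with
       | some a => some (f a)
       | none => d0.get? k) := by
  induction l generalizing d0 with
  | nil => simp
  | cons a t ih =>
    simp only [List.foldl_cons, ih, List.reverse_cons, List.find?_append]
    cases h : t.reverse.find? (fun a => key a == k) with
    | some b => simp [h]
    | none =>
      simp only [h, Option.none_or, List.find?_cons, List.find?_nil]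
      rw [PySem.Dict.get?_insert]
      by_cases hk : key a == k
      · have : k = key a := (beq_iff_eq.mp hk).symm
        simp [hk, this]
      · have : ¬ k = key a := fun he => hk (by simp [he])
        simp [hk, this]

theorem pvD_get? (issues : List (List (String × String))) (k : String) :
    (pvD issues).get? k = issues.reverse.find? (fun a => pvNormKey a == k) := by
  have h := pvGet?_foldl_insert issues pvNormKey (fun i => i) PySem.Dict.empty k
  unfold pvD
  exact h.trans (by cases issues.reverse.find? (fun a => pvNormKey a == k) <;>
    simp [PySem.Dict.empty, PySem.Dict.get?])

theorem pvInfo_get? (issues : List (List (String × String))) (k : String) :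
    (pvInfo issues).get? k =
      (issues.reverse.find? (fun a => pvNormKey a == k)).map pvNormParent := by
  have h := pvGet?_foldl_insert issues pvNormKey pvNormParent PySem.Dict.empty k
  unfold pvInfo
  exact h.trans (by cases issues.reverse.find? (fun a => pvNormKey a == k) <;>
    simp [PySem.Dict.empty, PySem.Dict.get?])

theorem pvInfo_eq (issues : List (List (String × String))) (k : String) :
    (pvInfo issues).get? k = ((pvD issues).get? k).map pvNormParent := by
  rw [pvInfo_get?, pvD_get?]

theorem pvD_key (issues : List (List (String × String))) (k : String)
    (v : List (String × String)) (h : (pvD issues).get? k = some v) : pvNormKey v = k := by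
  rw [pvD_get?] at h
  have hb := List.find?_some h
  simp only [beq_iff_eq] at hb
  exact hb

theorem pvD_mem (issues : List (List (String × String))) (k : String)
    (v : List (String × String)) (h : (pvD issues).get? k = some v) : v ∈ issues := by
  rw [pvD_get?] at h
  exact List.mem_reverse.mp (List.mem_of_find?_eq_some h)

theorem pvD_keys_nodup (issues : List (List (String × String))) : (pvD issues).keys.Nodup := by
  exact PySem.Dict.nodup_keys_foldl_insert_key issues pvNormKey (fun _ i => i) PySem.Dict.empty
    PySem.Dict.nodup_keys_empty

theorem pvD_keys_len (issues : List (List (String × String))) :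
    (pvD issues).keys.length ≤ issues.length := by
  unfold pvD
  rw [PySem.Dict.keys_foldl_insert_key]
  simp only [PySem.Dict.keys_empty, PySem.Set.update_nil_left]
  calc (PySem.Set.ofList (issues.map pvNormKey)).length
      ≤ (issues.map pvNormKey).length := PySem.Set.length_ofList_le _
    _ = issues.length := List.length_map ..

-- under Pre_, distinct issues have distinct nonempty normalized keys
theorem pvUniq (issues : List (List (String × String)))
    (hnd : ((issues.map pvNormKey).filter (fun k => k ≠ "")).Nodup) :
    ∀ a ∈ issues, ∀ b ∈ issues, pvNormKey a = pvNormKey b → pvNormKey a ≠ "" → a = b := by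
  induction issues with
  | nil => intro a ha; simp at ha
  | cons x t ih =>
    intro a ha b hb hab hne
    simp only [List.map_cons, List.filter_cons] at hnd
    by_cases hx : pvNormKey x ≠ ""
    · rw [if_pos (by simpa using hx), List.nodup_cons] at hnd
      have hnotin : pvNormKey x ∉ (t.map pvNormKey).filter (fun k => k ≠ "") := hnd.1
      have htl := hnd.2
      rcases List.mem_cons.mp ha with rfl | hat
      · rcases List.mem_cons.mp hb with rfl | hbt
        · rfl
        · exact absurd (List.mem_filter.mpr ⟨List.mem_map.mpr ⟨b, hbt, hab.symm⟩, by simpa using hne⟩) hnotin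
      · rcases List.mem_cons.mp hb with rfl | hbt
        · exact absurd (List.mem_filter.mpr ⟨List.mem_map.mpr ⟨a, hat, hab⟩, by simpa [hab] using hne⟩) hnotin
        · exact ih htl a hat b hbt hab hne
    · push_neg at hx
      rw [if_neg (by simpa using hx)] at hnd
      rcases List.mem_cons.mp ha with rfl | hat
      · exact absurd hx hne
      · rcases List.mem_cons.mp hb with rfl | hbt
        · exact absurd (hab ▸ hx) hne
        · exact ih hnd a hat b hbt hab hne

theorem pvD_get_self (issues : List (List (String × String)))
    (hnd : ((issues.map pvNormKey).filter (fun k => k ≠ "")).Nodup)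
    (i : List (String × String)) (hi : i ∈ issues) (hne : pvNormKey i ≠ "") :
    (pvD issues).get? (pvNormKey i) = some i := by
  rw [pvD_get?]
  cases hf : issues.reverse.find? (fun a => pvNormKey a == pvNormKey i) with
  | some b =>
    have hb := List.find?_some hf
    simp only [beq_iff_eq] at hb
    have hbm := List.mem_reverse.mp (List.mem_of_find?_eq_some hf)
    have : b = i := pvUniq issues hnd b hbm i hi hb (hb ▸ hne)
    rw [this]
  | none =>
    exfalso
    have := List.find?_eq_none.mp hf i (List.mem_reverse.mpr hi)
    simp at this

-- path plumbing
theorem pvHop_eq_some_iff (d : PySem.Dict String (List (String × String)))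
    (cur : List (String × String)) (p : String) :
    pvHop d cur = some p ↔
      cur ≠ [] ∧ p = pvNormParent cur ∧ pvNormParent cur ≠ "" ∧
        ∃ w, d.get? (pvNormParent cur) = some w ∧ w ≠ [] := by
  unfold pvHop
  by_cases h1 : cur = []
  · simp [h1]
  · rw [if_neg h1]
    by_cases h2 : pvNormParent cur = ""
    · simp [h1, h2]
    · rw [if_neg h2]
      cases hw : d.get? (pvNormParent cur) with
      | none => simp [h1, h2, hw]
      | some w =>
        by_cases h3 : w = [] <;> simp [h1, h2, h3, eq_comm]

theorem pvStep_eq_some_iff (d : PySem.Dict String (List (String × String))) (k p : String) :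
    pvStep d k = some p ↔ ∃ v, d.get? k = some v ∧ pvHop d v = some p := by
  unfold pvStep
  cases hv : d.get? k <;> simp

theorem pvStep_ne (d : PySem.Dict String (List (String × String))) (k p : String)
    (h : pvStep d k = some p) : p ≠ "" ∧ pvValid d p ∧ pvValid d k := by
  obtain ⟨v, hv, hhop⟩ := (pvStep_eq_some_iff d k p).mp h
  obtain ⟨hcur, rfl, hpne, w, hw, hwne⟩ := (pvHop_eq_some_iff d v _).mp hhop
  exact ⟨hpne, ⟨w, hw, hwne⟩, ⟨v, hv, hcur⟩⟩

theorem pvPath_add (d : PySem.Dict String (List (String × String))) (a b : Nat) (k : String) :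
    pvPath d (a + b) k = (pvPath d a k).bind (pvPath d b) := by
  induction a generalizing k with
  | zero => simp [pvPath]
  | succ a ih =>
    have : a + 1 + b = (a + b) + 1 := by omega
    rw [this]
    show (match pvStep d k with | some p => pvPath d (a+b) p | none => none) = _
    cases h : pvStep d k with
    | none => simp [pvPath, h]
    | some p => simp [pvPath, h, ih]

theorem pvPath_ne_empty (d : PySem.Dict String (List (String × String))) (m : Nat) (k x : String)
    (h : pvPath d m k = some x) (hk : k ≠ "") : x ≠ "" := by
  induction m generalizing k with
  | zero => cases h; exact hk
  | succ m ih =>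
    have h' : (match pvStep d k with | some p => pvPath d m p | none => none) = some x := h
    cases hs : pvStep d k with
    | none => rw [hs] at h'; simp at h'
    | some p => rw [hs] at h'; exact ih p h' (pvStep_ne d k p hs).1

theorem pvPath_valid (d : PySem.Dict String (List (String × String))) (m : Nat) (k x : String)
    (hv : pvValid d k) (h : pvPath d m k = some x) : pvValid d x := by
  induction m generalizing k with
  | zero => cases h; exact hv
  | succ m ih =>
    have h' : (match pvStep d k with | some p => pvPath d m p | none => none) = some x := h
    cases hs : pvStep d k with
    | none => rw [hs] at h'; simp at h'
    | some p => rw [hs] at h'; exact ih p (pvStep_ne d k p hs).2.1 h'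

theorem pvPath_mem_keys (d : PySem.Dict String (List (String × String))) (m : Nat) (k x : String)
    (hv : pvValid d k) (h : pvPath d m k = some x) : x ∈ d.keys := by
  obtain ⟨v, hx, -⟩ := pvPath_valid d m k x hv h
  by_contra hmem
  rw [(PySem.Dict.get?_eq_none_iff_not_mem_keys ..).mpr hmem] at hx
  cases hx

theorem pvGood_valid_anc (d : PySem.Dict String (List (String × String))) (anc : String) (k : String)
    (h : pvGood d anc k) : pvValid d anc := by
  obtain ⟨hv, m, hm⟩ := h
  exact pvPath_valid d m k anc hv hm

-- minimal path: pairwise distinct nodes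
theorem pvPath_succ (d : PySem.Dict String (List (String × String))) (k p : String) (j : Nat)
    (h : pvStep d k = some p) : pvPath d (j+1) k = pvPath d j p := by
  show (match pvStep d k with | some q => pvPath d j q | none => none) = _
  rw [h]

theorem pvMinimal_nodup (d : PySem.Dict String (List (String × String))) (anc k : String)
    (m : Nat) (hm : pvPath d m k = some anc) (hmin : ∀ j, pvPath d j k = some anc → m ≤ j)
    (i j : Nat) (hij : i < j) (hj : j ≤ m) : pvPath d i k ≠ pvPath d j k := by
  intro heq
  have hj' : j + (m - j) = m := by omega
  have hcomp : pvPath d (i + (m - j)) k = some anc := by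
    rw [pvPath_add d i (m - j) k, heq, ← pvPath_add d j (m - j) k, hj']
    exact hm
  have := hmin _ hcomp
  omega

-- ===== A-side: the climb computes pvGood =====
theorem pvClimbA_sound (d : PySem.Dict String (List (String × String))) (anc : String)
    (hkey : ∀ k v, d.get? k = some v → pvNormKey v = k) :
    ∀ fuel cur seen, pvClimbA d anc fuel cur seen = true →
      cur ≠ [] ∧ (pvNormKey cur = anc ∨ ∃ p, pvHop d cur = some p ∧ ∃ m, pvPath d m p = some anc) := by
  intro fuel
  induction fuel with
  | zero => intro cur seen h; simp [pvClimbA] at h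
  | succ fuel ih =>
    intro cur seen h
    rw [pvClimbA] at h
    by_cases h1 : cur = []
    · rw [if_pos h1] at h; cases h
    rw [if_neg h1] at h
    simp only at h
    refine ⟨h1, ?_⟩
    by_cases h2 : pvNormKey cur = anc
    · exact Or.inl h2
    rw [if_neg h2] at h
    by_cases h3 : PySem.Set.contains seen (pvNormKey cur) = true
    · rw [if_pos h3] at h; cases h
    rw [if_neg h3] at h
    by_cases h4 : pvNormParent cur = ""
    · rw [if_pos h4] at h; cases h
    rw [if_neg h4] at h
    cases hget : d.get? (pvNormParent cur) with
    | none => rw [hget] at h; cases h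
    | some c =>
      rw [hget] at h
      obtain ⟨hc, hrest⟩ := ih c _ h
      have hhop : pvHop d cur = some (pvNormParent cur) :=
        (pvHop_eq_some_iff d cur _).mpr ⟨h1, rfl, h4, c, hget, hc⟩
      refine Or.inr ⟨pvNormParent cur, hhop, ?_⟩
      have hck : pvNormKey c = pvNormParent cur := hkey _ c hget
      rcases hrest with hca | ⟨q, hq, m, hpath⟩
      · exact ⟨0, by rw [show pvPath d 0 (pvNormParent cur) = some (pvNormParent cur) from rfl, ← hck, hca]⟩
      · have hstep : pvStep d (pvNormParent cur) = some q :=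
          (pvStep_eq_some_iff ..).mpr ⟨c, hget, hq⟩
        exact ⟨m + 1, by rw [pvPath_succ d _ q m hstep]; exact hpath⟩

theorem pvClimbA_complete (d : PySem.Dict String (List (String × String))) (anc : String)
    (hkey : ∀ k v, d.get? k = some v → pvNormKey v = k) :
    ∀ m k cur seen fuel,
      pvPath d m k = some anc →
      (∀ i j, i < j → j ≤ m → pvPath d i k ≠ pvPath d j k) →
      (∀ j, j ≤ m → ∀ x, pvPath d j k = some x → ¬ x ∈ seen) →
      d.get? k = some cur → cur ≠ [] → m < fuel →
      pvClimbA d anc fuel cur seen = true := by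
  intro m
  induction m with
  | zero =>
    intro k cur seen fuel hpath hdist hseen hget hcur hfuel
    have hk : k = anc := by
      have : some k = some anc := hpath
      cases this; rfl
    cases fuel with
    | zero => omega
    | succ f =>
      rw [pvClimbA, if_neg hcur]
      simp only
      rw [if_pos (by rw [hkey k cur hget, hk])]
  | succ m ih =>
    intro k cur seen fuel hpath hdist hseen hget hcur hfuel
    cases fuel with
    | zero => omega
    | succ f =>
      have hstep : ∃ p, pvStep d k = some p ∧ pvPath d m p = some anc := by
        have h' : (match pvStep d k with | some p => pvPath d m p | none => none) = some anc := hpath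
        cases hs : pvStep d k with
        | none => rw [hs] at h'; cases h'
        | some p => rw [hs] at h'; exact ⟨p, rfl, h'⟩
      obtain ⟨p, hs, hpathp⟩ := hstep
      obtain ⟨v, hv, hhop⟩ := (pvStep_eq_some_iff d k p).mp hs
      have hveq : v = cur := by rw [hv] at hget; cases hget; rfl
      subst hveq
      obtain ⟨-, hpeq, hpne, w, hw, hwne⟩ := (pvHop_eq_some_iff d v p).mp hhop
      subst hpeq
      have hkcur : pvNormKey v = k := hkey k v hv
      rw [pvClimbA, if_neg hcur]
      simp only
      by_cases hkanc : pvNormKey v = anc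
      · rw [if_pos hkanc]
      · rw [if_neg hkanc]
        have hknotseen : ¬ k ∈ seen := hseen 0 (by omega) k rfl
        have hcont : ¬ PySem.Set.contains seen (pvNormKey v) = true := by
          rw [hkcur]
          intro hc
          exact hknotseen ((PySem.Set.contains_iff ..).mp hc)
        rw [if_neg hcont, if_neg hpne, hw]
        apply ih (pvNormParent v) w (PySem.Set.add seen (pvNormKey v)) f hpathp
        · intro i j hij hj
          rw [← pvPath_succ d k _ i hs, ← pvPath_succ d k _ j hs]
          exact hdist (i+1) (j+1) (by omega) (by omega)
        · intro j hj x hx hmem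
          rcases (PySem.Set.mem_add ..).mp hmem with hin | hxk
          · exact hseen (j+1) (by omega) x (by rw [pvPath_succ d k _ j hs]; exact hx) hin
          · have : pvPath d 0 k ≠ pvPath d (j+1) k := hdist 0 (j+1) (by omega) (by omega)
            rw [pvPath_succ d k _ j hs, hx] at this
            exact this (by rw [show pvPath d 0 k = some k from rfl, hxk, hkcur])
        · exact hw
        · exact hwne
        · omega

-- ===== B-side: children / bfs compute pvGood =====
theorem pvChildren_getD :
    ∀ (l : List (String × String)) (acc : PySem.Dict String (List String)) (u : String),
      (l.foldl (fun acc kv => if kv.2 ≠ "" then acc.modify kv.2 [] (· ++ [kv.1]) else acc) acc).getD u [] =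
        acc.getD u [] ++ ((l.filter (fun kv => kv.2 ≠ "")).filter (fun kv => kv.2 == u)).map (·.1) := by
  intro l
  induction l with
  | nil => simp
  | cons kv t ih =>
    intro acc u
    simp only [List.foldl_cons, List.filter_cons]
    by_cases he : kv.2 = ""
    · rw [if_neg (by simp [he]), ih, if_neg (by simp [he])]
    · rw [if_pos (by simpa using he), ih, if_pos (by simpa using he)]
      by_cases hu : kv.2 = u
      · rw [List.filter_cons, if_pos (by simp [hu])]
        rw [PySem.Dict.getD_modify]
        simp [hu, List.append_assoc]
      · rw [List.filter_cons, if_neg (by simp [hu])]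
        rw [PySem.Dict.getD_modify]
        simp [Ne.symm hu, hu]

theorem pvInfo_keys_nodup (issues : List (List (String × String))) : (pvInfo issues).keys.Nodup :=
  PySem.Dict.nodup_keys_foldl_insert_key issues pvNormKey
    (fun _ i => pvNormParent i) PySem.Dict.empty PySem.Dict.nodup_keys_empty

-- membership in the reverse index, phrased as the hop relation; needs the target valid
theorem pvChildren_mem (issues : List (List (String × String))) (u c : String)
    (hu : pvValid (pvD issues) u) :
    c ∈ (pvChildren (pvInfo issues)).getD u [] ↔ pvStep (pvD issues) c = some u := by
  unfold pvChildren
  rw [pvChildren_getD]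
  simp only [PySem.Dict.getD_empty, List.nil_append, List.mem_map, List.mem_filter]
  constructor
  · rintro ⟨kv, ⟨⟨hmem, hedge⟩, hu'⟩, hc⟩
    have hget : (pvInfo issues).get? kv.1 = some kv.2 :=
      PySem.Dict.get?_of_mem_items (pvInfo issues) (show (kv.1, kv.2) ∈ _ from hmem) (pvInfo_keys_nodup issues)
    rw [pvInfo_eq] at hget
    obtain ⟨v, hd, hpar⟩ := Option.map_eq_some_iff.mp hget
    simp only [beq_iff_eq] at hu'
    simp only [decide_eq_true_eq] at hedge
    rw [← hpar] at hedge hu'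
    have hvne : v ≠ [] := by
      intro hv0
      rw [hv0, pvNormParent_nil] at hedge
      exact hedge rfl
    subst hc
    rw [pvStep_eq_some_iff]
    exact ⟨v, hd, (pvHop_eq_some_iff ..).mpr ⟨hvne, hu'.symm, hedge, hu' ▸ hu⟩⟩
  · intro hs
    obtain ⟨v, hv, hhop⟩ := (pvStep_eq_some_iff ..).mp hs
    obtain ⟨hvne, hpeq, hpne, w, hw, hwne⟩ := (pvHop_eq_some_iff ..).mp hhop
    refine ⟨(c, pvNormParent v), ⟨⟨?_, by simpa using hpne⟩, by simp [hpeq]⟩, rfl⟩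
    have : (pvInfo issues).get? c = some (pvNormParent v) := by
      rw [pvInfo_eq, hv]; rfl
    exact PySem.Dict.mem_items_of_get?_eq_some (pvInfo issues) this

-- any member of the reverse-index bucket is a key of the dict
theorem pvChildren_mem_keys (issues : List (List (String × String))) (u c : String)
    (hc : c ∈ (pvChildren (pvInfo issues)).getD u []) : c ∈ (pvD issues).keys := by
  unfold pvChildren at hc
  rw [pvChildren_getD] at hc
  simp only [PySem.Dict.getD_empty, List.nil_append, List.mem_map, List.mem_filter] at hc
  obtain ⟨kv, ⟨⟨hmem, -⟩, -⟩, hc⟩ := hc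
  have hget : (pvInfo issues).get? kv.1 = some kv.2 :=
    PySem.Dict.get?_of_mem_items (pvInfo issues) (show (kv.1, kv.2) ∈ _ from hmem) (pvInfo_keys_nodup issues)
  rw [pvInfo_eq] at hget
  obtain ⟨v, hd, -⟩ := Option.map_eq_some_iff.mp hget
  subst hc
  by_contra hk
  rw [(PySem.Dict.get?_eq_none_iff_not_mem_keys ..).mpr hk] at hd
  cases hd

-- the inner push loop of the BFS
def pvFoldPush (cs : List String) (s : PySem.Set String) (st : List String) :
    PySem.Set String × List String :=
  cs.foldl (fun acc c => if PySem.Set.contains acc.1 c then acc else (PySem.Set.add acc.1 c, acc.2 ++ [c])) (s, st)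

theorem pvContains_decide (s : PySem.Set String) (x : String) :
    PySem.Set.contains s x = decide (x ∈ s) := by
  by_cases h : x ∈ s
  · rw [(PySem.Set.contains_iff ..).mpr h]; simp [h]
  · have hf : PySem.Set.contains s x = false := by
      rw [Bool.eq_false_iff]; exact fun hh => h ((PySem.Set.contains_iff ..).mp hh)
    rw [hf]; simp [h]

theorem pvFoldPush_mem (cs : List String) :
    ∀ (s : PySem.Set String) (st : List String),
      (∀ x, x ∈ (pvFoldPush cs s st).1 ↔ x ∈ s ∨ x ∈ cs) ∧
      (∀ x, x ∈ (pvFoldPush cs s st).2 ↔ x ∈ st ∨ (x ∈ cs ∧ ¬ x ∈ s)) := by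
  induction cs with
  | nil => intro s st; simp [pvFoldPush]
  | cons c t ih =>
    intro s st
    by_cases hcs : c ∈ s
    · have heq : pvFoldPush (c :: t) s st = pvFoldPush t s st := by
        unfold pvFoldPush
        rw [List.foldl_cons, if_pos ((PySem.Set.contains_iff ..).mpr hcs)]
      rw [heq]
      obtain ⟨ih1, ih2⟩ := ih s st
      constructor
      · intro x
        rw [ih1]; simp only [List.mem_cons]
        have hxc : x = c → x ∈ s := fun h => h ▸ hcs
        tauto
      · intro x
        rw [ih2]; simp only [List.mem_cons]
        have hxc : x = c → x ∈ s := fun h => h ▸ hcs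
        tauto
    · have heq : pvFoldPush (c :: t) s st = pvFoldPush t (PySem.Set.add s c) (st ++ [c]) := by
        unfold pvFoldPush
        rw [List.foldl_cons, if_neg]
        intro hh
        exact hcs ((PySem.Set.contains_iff ..).mp hh)
      rw [heq]
      obtain ⟨ih1, ih2⟩ := ih (PySem.Set.add s c) (st ++ [c])
      constructor
      · intro x
        rw [ih1, PySem.Set.mem_add]
        simp only [List.mem_cons]
        tauto
      · intro x
        rw [ih2]
        simp only [List.mem_append, List.mem_singleton, List.mem_cons, PySem.Set.mem_add]
        have hxc : x = c → ¬ x ∈ s := fun h => h ▸ hcs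
        tauto

-- one free key disappears when a fresh element is added
theorem pvFree_add (K : List String) (hK : K.Nodup) (s : PySem.Set String) (c : String)
    (hcK : c ∈ K) (hcs : ¬ c ∈ s) :
    (K.filter (fun k => !(PySem.Set.contains (PySem.Set.add s c) k))).length + 1 =
      (K.filter (fun k => !(PySem.Set.contains s k))).length := by
  have hpred : ∀ k ∈ K, (!(PySem.Set.contains (PySem.Set.add s c) k)) =
      (decide (k ≠ c) && (!(PySem.Set.contains s k))) := by
    intro k _
    rw [pvContains_decide, pvContains_decide]
    by_cases h1 : k ∈ s <;> by_cases h2 : k = c <;>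
      simp [PySem.Set.mem_add, h1, h2]
  rw [List.filter_congr hpred, ← List.filter_filter]
  set L := K.filter (fun k => !(PySem.Set.contains s k)) with hL
  have hLnd : L.Nodup := hK.filter _
  have hcL : c ∈ L := by
    rw [hL, List.mem_filter, pvContains_decide]
    exact ⟨hcK, by simp [hcs]⟩
  have hfn : (fun (x : String) => decide (x ≠ c)) = (fun x => x != c) := by
    funext x; by_cases h : x = c <;> simp [h, bne]
  rw [hfn, ← List.Nodup.erase_eq_filter hLnd, List.length_erase_of_mem hcL]
  have : 1 ≤ L.length := List.length_pos_of_mem hcL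
  omega

theorem pvFoldPush_len (issues : List (List (String × String))) (cs : List String) :
    ∀ (s : PySem.Set String) (st : List String), (∀ c ∈ cs, c ∈ (pvD issues).keys) →
      (pvFoldPush cs s st).2.length +
        ((pvD issues).keys.filter (fun k => !(PySem.Set.contains (pvFoldPush cs s st).1 k))).length =
      st.length + ((pvD issues).keys.filter (fun k => !(PySem.Set.contains s k))).length := by
  induction cs with
  | nil => intro s st _; simp [pvFoldPush]
  | cons c t ih =>
    intro s st hsub
    cases hc : PySem.Set.contains s c with
    | true =>
      have heq : pvFoldPush (c :: t) s st = pvFoldPush t s st := by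
        unfold pvFoldPush
        rw [List.foldl_cons, if_pos hc]
      rw [heq]
      exact ih s st (fun x hx => hsub x (List.mem_cons_of_mem c hx))
    | false =>
      have hcns : ¬ c ∈ s := fun h => by
        rw [(PySem.Set.contains_iff ..).mpr h] at hc; cases hc
      have heq : pvFoldPush (c :: t) s st = pvFoldPush t (PySem.Set.add s c) (st ++ [c]) := by
        unfold pvFoldPush
        rw [List.foldl_cons, if_neg (by rw [hc]; exact Bool.false_ne_true)]
      rw [heq, ih _ _ (fun x hx => hsub x (List.mem_cons_of_mem c hx))]
      rw [List.length_append]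
      have := pvFree_add (pvD issues).keys (pvD_keys_nodup issues) s c
        (hsub c (List.mem_cons_self ..)) hcns
      simp only [List.length_singleton]
      omega

theorem pvBfs_main (issues : List (List (String × String))) (anc : String) :
    ∀ (fuel : Nat) (stack : List String) (s : PySem.Set String),
      (∀ x ∈ s, pvGood (pvD issues) anc x) →
      (∀ x ∈ stack, x ∈ s) →
      (∀ x ∈ s, x ∈ stack ∨ ∀ c, pvStep (pvD issues) c = some x → c ∈ s) →
      stack.length + ((pvD issues).keys.filter (fun k => !(PySem.Set.contains s k))).length < fuel →
      (∀ x ∈ pvBfs (pvChildren (pvInfo issues)) fuel stack s, pvGood (pvD issues) anc x) ∧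
      (∀ x ∈ s, x ∈ pvBfs (pvChildren (pvInfo issues)) fuel stack s) ∧
      (∀ x ∈ pvBfs (pvChildren (pvInfo issues)) fuel stack s,
        ∀ c, pvStep (pvD issues) c = some x → c ∈ pvBfs (pvChildren (pvInfo issues)) fuel stack s) := by
  intro fuel
  induction fuel with
  | zero => intro stack s _ _ _ hfuel; omega
  | succ fuel ih =>
    intro stack s hgood hsub hpend hfuel
    cases hlast : stack.getLast? with
    | none =>
      have hstack : stack = [] := List.getLast?_eq_none_iff.mp hlast
      have hres : pvBfs (pvChildren (pvInfo issues)) (fuel+1) stack s = s := by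
        rw [pvBfs, hlast]
      rw [hres]
      refine ⟨hgood, fun x hx => hx, fun x hx c hc => ?_⟩
      rcases hpend x hx with hin | hcl
      · rw [hstack] at hin; cases hin
      · exact hcl c hc
    | some u =>
      obtain ⟨st0, rfl⟩ : ∃ st0, stack = st0 ++ [u] := by
        obtain ⟨st0, hst0⟩ := List.getLast?_eq_some_iff.mp hlast
        exact ⟨st0, hst0⟩
      have hdrop : (st0 ++ [u]).dropLast = st0 := by simp
      have hres : pvBfs (pvChildren (pvInfo issues)) (fuel+1) (st0 ++ [u]) s =
          pvBfs (pvChildren (pvInfo issues)) fuel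
            (pvFoldPush ((pvChildren (pvInfo issues)).getD u []) s st0).2
            (pvFoldPush ((pvChildren (pvInfo issues)).getD u []) s st0).1 := by
        rw [pvBfs, hlast, hdrop]; rfl
      rw [hres]
      set cs := (pvChildren (pvInfo issues)).getD u [] with hcs
      obtain ⟨hm1, hm2⟩ := pvFoldPush_mem cs s st0
      have humem : u ∈ s := hsub u (List.mem_append_right _ (List.mem_singleton.mpr rfl))
      have hugood : pvGood (pvD issues) anc u := hgood u humem
      have huvalid : pvValid (pvD issues) u := hugood.1
      have hcsgood : ∀ c ∈ cs, pvGood (pvD issues) anc c := by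
        intro c hc
        have hstep : pvStep (pvD issues) c = some u := (pvChildren_mem issues u c huvalid).mp hc
        obtain ⟨-, -, hvc⟩ := pvStep_ne _ _ _ hstep
        obtain ⟨-, m, hpath⟩ := hugood
        exact ⟨hvc, m + 1, by rw [pvPath_succ _ _ _ m hstep]; exact hpath⟩
      have hI1 : ∀ x ∈ (pvFoldPush cs s st0).1, pvGood (pvD issues) anc x := by
        intro x hx
        rcases (hm1 x).mp hx with hxs | hxcs
        · exact hgood x hxs
        · exact hcsgood x hxcs
      have hI2 : ∀ x ∈ (pvFoldPush cs s st0).2, x ∈ (pvFoldPush cs s st0).1 := by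
        intro x hx
        rcases (hm2 x).mp hx with hxd | ⟨hxcs, -⟩
        · exact (hm1 x).mpr (Or.inl (hsub x (List.mem_append_left _ hxd)))
        · exact (hm1 x).mpr (Or.inr hxcs)
      have hclosedOld : ∀ x ∈ s, x ∈ (pvFoldPush cs s st0).2 ∨
          ∀ c, pvStep (pvD issues) c = some x → c ∈ (pvFoldPush cs s st0).1 := by
        intro x hxs
        by_cases hxu : x = u
        · subst hxu
          right
          intro c hc
          exact (hm1 c).mpr (Or.inr (by rw [hcs]; exact (pvChildren_mem issues x c (hgood x hxs).1).mpr hc))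
        · rcases hpend x hxs with hin | hcl
          · left
            have hxdrop : x ∈ st0 := by
              rcases List.mem_append.mp hin with h | h
              · exact h
              · exact absurd (List.mem_singleton.mp h) hxu
            exact (hm2 x).mpr (Or.inl hxdrop)
          · right; intro c hc; exact (hm1 c).mpr (Or.inl (hcl c hc))
      have hI3 : ∀ x ∈ (pvFoldPush cs s st0).1, x ∈ (pvFoldPush cs s st0).2 ∨
          ∀ c, pvStep (pvD issues) c = some x → c ∈ (pvFoldPush cs s st0).1 := by
        intro x hx
        rcases (hm1 x).mp hx with hxs | hxcs
        · exact hclosedOld x hxs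
        · by_cases hxs : x ∈ s
          · exact hclosedOld x hxs
          · exact Or.inl ((hm2 x).mpr (Or.inr ⟨hxcs, hxs⟩))
      have hcskeys : ∀ c ∈ cs, c ∈ (pvD issues).keys := by
        intro c hc
        exact pvChildren_mem_keys issues u c hc
      have hlen := pvFoldPush_len issues cs s st0 hcskeys
      have hstlen : (st0 ++ [u]).length = st0.length + 1 := by simp
      have hIf : (pvFoldPush cs s st0).2.length +
          ((pvD issues).keys.filter (fun k => !(PySem.Set.contains (pvFoldPush cs s st0).1 k))).length < fuel := by
        omega
      obtain ⟨g1, g2, g3⟩ := ih (pvFoldPush cs s st0).2 (pvFoldPush cs s st0).1 hI1 hI2 hI3 hIf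
      exact ⟨g1, fun x hx => g2 x ((hm1 x).mpr (Or.inl hx)), g3⟩

theorem pvReach_of_closed (issues : List (List (String × String))) (anc : String)
    (r : PySem.Set String)
    (hclosed : ∀ x ∈ r, ∀ c, pvStep (pvD issues) c = some x → c ∈ r)
    (hanc : anc ∈ r) :
    ∀ (m : Nat) (x : String), pvPath (pvD issues) m x = some anc → x ∈ r := by
  intro m
  induction m with
  | zero => intro x hx; cases hx; exact hanc
  | succ m ih =>
    intro x hx
    have h' : (match pvStep (pvD issues) x with | some p => pvPath (pvD issues) m p | none => none) = some anc := hx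
    cases hs : pvStep (pvD issues) x with
    | none => rw [hs] at h'; cases h'
    | some p =>
      rw [hs] at h'
      exact hclosed p (ih p h') x hs

theorem pvBfs_correct (issues : List (List (String × String))) (anc : String)
    (hanc : pvValid (pvD issues) anc) :
    ∀ x, x ∈ pvBfs (pvChildren (pvInfo issues)) (issues.length + 1) [anc]
            (PySem.Set.add PySem.Set.empty anc) ↔ pvGood (pvD issues) anc x := by
  have hancs : ∀ y, y ∈ PySem.Set.add PySem.Set.empty anc ↔ y = anc := by
    intro y
    rw [PySem.Set.mem_add]
    simp [PySem.Set.empty]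
  have hanckeys : anc ∈ (pvD issues).keys := by
    obtain ⟨v, hv, -⟩ := hanc
    by_contra hmem
    rw [(PySem.Dict.get?_eq_none_iff_not_mem_keys ..).mpr hmem] at hv
    cases hv
  have hfree : ((pvD issues).keys.filter
      (fun k => !(PySem.Set.contains (PySem.Set.add PySem.Set.empty anc) k))).length + 1 =
      ((pvD issues).keys.filter (fun k => !(PySem.Set.contains PySem.Set.empty k))).length := by
    exact pvFree_add (pvD issues).keys (pvD_keys_nodup issues) PySem.Set.empty anc hanckeys (by simp [PySem.Set.empty])
  have hfree2 : ((pvD issues).keys.filter (fun k => !(PySem.Set.contains PySem.Set.empty k))).length ≤ issues.length := by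
    calc ((pvD issues).keys.filter (fun k => !(PySem.Set.contains PySem.Set.empty k))).length
        ≤ (pvD issues).keys.length := List.length_filter_le ..
      _ ≤ issues.length := pvD_keys_len issues
  obtain ⟨hgood, hsub, hclosed⟩ := pvBfs_main issues anc (issues.length + 1) [anc]
    (PySem.Set.add PySem.Set.empty anc)
    (by intro x hx; rw [hancs x] at hx; subst hx; exact ⟨hanc, 0, rfl⟩)
    (by intro x hx; rw [hancs x]; exact List.mem_singleton.mp hx)
    (by intro x hx; rw [hancs x] at hx; subst hx; exact Or.inl (List.mem_singleton.mpr rfl))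
    (by simp only [List.length_singleton]; omega)
  intro x
  constructor
  · exact hgood x
  · rintro ⟨hvx, m, hm⟩
    exact pvReach_of_closed issues anc _ hclosed (hsub anc ((hancs anc).mpr rfl)) m x hm

-- A's per-issue climb decides pvGood of the first hop
theorem pvPerIssue (issues : List (List (String × String))) (anc : String)
    (hnd : ((issues.map pvNormKey).filter (fun k => k ≠ "")).Nodup)
    (i : List (String × String)) (hi : i ∈ issues) :
    pvClimbA (pvD issues) anc (issues.length + 1) i PySem.Set.empty = true ↔
      (i ≠ [] ∧ (pvNormKey i = anc ∨
        ∃ p, pvHop (pvD issues) i = some p ∧ ∃ m, pvPath (pvD issues) m p = some anc)) := by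
  constructor
  · exact pvClimbA_sound (pvD issues) anc (pvD_key issues) (issues.length + 1) i PySem.Set.empty
  · rintro ⟨hne, hrest⟩
    by_cases hk : pvNormKey i = anc
    · rw [pvClimbA, if_neg hne]
      simp only
      rw [if_pos hk]
    rcases hrest with hk' | ⟨p, hhop, m0, hpath0⟩
    · exact absurd hk' hk
    obtain ⟨-, hpeq, hpne, w, hw, hwne⟩ := (pvHop_eq_some_iff ..).mp hhop
    subst hpeq
    have hex : ∃ m, pvPath (pvD issues) m (pvNormParent i) = some anc := ⟨m0, hpath0⟩
    set m := Nat.find hex with hmdef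
    have hm : pvPath (pvD issues) m (pvNormParent i) = some anc := Nat.find_spec hex
    have hmin : ∀ j, pvPath (pvD issues) j (pvNormParent i) = some anc → m ≤ j :=
      fun j hj => Nat.find_min' hex hj
    have hdist := pvMinimal_nodup (pvD issues) anc (pvNormParent i) m hm hmin
    have hvp : pvValid (pvD issues) (pvNormParent i) := ⟨w, hw, hwne⟩
    -- the minimal path visits m+1 distinct keys, so m < issues.length
    have hbound : m < issues.length := by
      set L := (List.range (m+1)).map (fun j => pvPath (pvD issues) j (pvNormParent i)) with hLdef
      have hLnd : L.Nodup := by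
        refine List.Nodup.map_on ?_ (List.nodup_range)
        intro a ha b hb hab
        rcases lt_trichotomy a b with h | h | h
        · exact absurd hab (hdist a b h (by simpa using Nat.lt_succ_iff.mp (List.mem_range.mp hb)))
        · exact h
        · exact absurd hab.symm (hdist b a h (by simpa using Nat.lt_succ_iff.mp (List.mem_range.mp ha)))
      have hLsub : L ⊆ (pvD issues).keys.map some := by
        intro o ho
        obtain ⟨j, hj, rfl⟩ := List.mem_map.mp ho
        have hjm : j ≤ m := Nat.lt_succ_iff.mp (List.mem_range.mp hj)
        have hsome : ∃ x, pvPath (pvD issues) j (pvNormParent i) = some x := by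
          have : pvPath (pvD issues) (j + (m - j)) (pvNormParent i) = some anc := by
            rw [show j + (m - j) = m from by omega]; exact hm
          rw [pvPath_add] at this
          cases hx : pvPath (pvD issues) j (pvNormParent i) with
          | none => rw [hx] at this; cases this
          | some x => exact ⟨x, rfl⟩
        obtain ⟨x, hx⟩ := hsome
        rw [hx]
        exact List.mem_map.mpr ⟨x, pvPath_mem_keys _ j _ x hvp hx, rfl⟩
      have hlen : L.length = m + 1 := by simp [hLdef]
      have hkeysnd : ((pvD issues).keys.map some).Nodup :=
        (pvD_keys_nodup issues).map (Option.some_injective _)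
      have := (List.subperm_of_subset hLnd hLsub).length_le
      have hkl := pvD_keys_len issues
      simp only [hlen, List.length_map] at this
      omega
    rw [pvClimbA, if_neg hne]
    simp only
    rw [if_neg hk]
    have hcont : ¬ PySem.Set.contains PySem.Set.empty (pvNormKey i) = true := by
      rw [pvContains_decide]
      simp [PySem.Set.empty]
    rw [if_neg hcont, if_neg hpne, hw]
    apply pvClimbA_complete (pvD issues) anc (pvD_key issues) m (pvNormParent i) w
      (PySem.Set.add PySem.Set.empty (pvNormKey i)) issues.length hm hdist ?_ hw hwne hbound
    intro j hj x hx hmem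
    have hxk : x = pvNormKey i := by
      rcases (PySem.Set.mem_add ..).mp hmem with h | h
      · simp [PySem.Set.empty] at h
      · exact h
    by_cases hk0 : pvNormKey i = ""
    · exact pvPath_ne_empty (pvD issues) j (pvNormParent i) x hx hpne (hxk.trans hk0)
    · have hget0 : (pvD issues).get? (pvNormKey i) = some i := pvD_get_self issues hnd i hi hk0
      by_cases hjm : j = m
      · subst hjm
        rw [hm] at hx
        cases hx
        exact hk (hxk.symm)
      · have hstep0 : pvStep (pvD issues) (pvNormKey i) = some (pvNormParent i) :=
          (pvStep_eq_some_iff ..).mpr ⟨i, hget0, hhop⟩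
        have h1 : pvPath (pvD issues) 1 x = some (pvNormParent i) := by
          rw [hxk, pvPath_succ (pvD issues) _ _ 0 hstep0]
          rfl
        have hj1 : pvPath (pvD issues) (j + 1) (pvNormParent i) = some (pvNormParent i) := by
          rw [pvPath_add, hx]
          exact h1
        exact hdist 0 (j+1) (by omega) (by omega) (hj1.symm)

-- the reach set B computes contains exactly the pvGood keys
theorem pvReach_iff (issues : List (List (String × String))) (anc : String)
    (hne : ∀ w, (pvD issues).get? anc = some w → w ≠ []) :
    ∀ p, PySem.Set.contains
        (match (pvInfo issues).get? anc with
         | some _ => pvBfs (pvChildren (pvInfo issues)) (issues.length + 1) [anc]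
              (PySem.Set.add PySem.Set.empty anc)
         | none => PySem.Set.empty) p = true ↔ pvGood (pvD issues) anc p := by
  intro p
  cases hd : (pvD issues).get? anc with
  | none =>
    have hia : (pvInfo issues).get? anc = none := by rw [pvInfo_eq, hd]; rfl
    rw [hia]
    simp only [pvContains_decide, PySem.Set.empty, decide_eq_true_eq, List.mem_nil_iff]
    constructor
    · intro h; cases h
    · intro hg
      obtain ⟨v, hv, -⟩ := pvGood_valid_anc _ _ _ hg
      rw [hd] at hv; cases hv
  | some v =>
    have hia : (pvInfo issues).get? anc = some (pvNormParent v) := by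
      rw [pvInfo_eq, hd]; rfl
    rw [hia]
    rw [PySem.Set.contains_iff]
    exact pvBfs_correct issues anc ⟨v, hd, hne v hd⟩ p

-- ===== VERDICT (by name: the statement is the Claim_ definition above) =====
theorem filter_issues_under_ancestor_py_spec : Claim_equal_filter_issues_under_ancestor_py := by
  intro issues ak hdom hpre
  obtain ⟨hnd, hblank⟩ := hpre
  unfold Spec_filter_issues_under_ancestor_py filter_issues_under_ancestor_py filter_issues_under_ancestor_py_alt
  by_cases htop : ak = "" ∨ issues = []
  · rw [if_pos htop, if_pos htop]
  · rw [if_neg htop, if_neg htop]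
    simp only
    set anc := PySem.Str.upper (PySem.Str.strip ak) with hanc
    have hanc_ne : ∀ w, (pvD issues).get? anc = some w → w ≠ [] := by
      intro w hw hw0
      subst hw0
      have h1 : anc = "" := by
        have := pvD_key issues anc [] hw
        rw [pvNormKey_nil] at this
        exact this.symm
      exact hblank (pvD_mem issues anc [] hw) h1
    set reach := (match (pvInfo issues).get? anc with
         | some _ => pvBfs (pvChildren (pvInfo issues)) (issues.length + 1) [anc]
              (PySem.Set.add PySem.Set.empty anc)
         | none => PySem.Set.empty) with hreach
    apply List.filter_congr
    intro i hi
    rw [Bool.eq_iff_iff, pvPerIssue issues anc hnd i hi]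
    have hR : ∀ p, PySem.Set.contains reach p = true ↔ pvGood (pvD issues) anc p := by
      rw [hreach]; exact pvReach_iff issues anc hanc_ne
    constructor
    -- → : A's climb succeeded, produce B's predicate
    · rintro ⟨hne, hk | ⟨p, hhop, m, hpath⟩⟩
      · rw [if_pos hk]
      · obtain ⟨-, hpeq, hpne, w, hw, hwne⟩ := (pvHop_eq_some_iff ..).mp hhop
        subst hpeq
        by_cases hkey : pvNormKey i = anc
        · rw [if_pos hkey]
        · rw [if_neg hkey]
          simp only [Bool.and_eq_true, decide_eq_true_eq]
          exact ⟨hpne, (hR _).mpr ⟨⟨w, hw, hwne⟩, m, hpath⟩⟩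
    -- ← : B's predicate holds, recover A's climb
    · intro hB
      by_cases hkey : pvNormKey i = anc
      · refine ⟨?_, Or.inl hkey⟩
        intro hi0
        rw [hi0, pvNormKey_nil] at hkey
        exact hblank (hi0 ▸ hi) hkey.symm
      · rw [if_neg hkey] at hB
        simp only [Bool.and_eq_true, decide_eq_true_eq] at hB
        obtain ⟨hpne, hcont⟩ := hB
        obtain ⟨⟨w, hw, hwne⟩, m, hpath⟩ := (hR _).mp hcont
        have hine : i ≠ [] := by
          intro hi0
          rw [hi0, pvNormParent_nil] at hpne
          exact hpne rfl
        exact ⟨hine, Or.inr ⟨pvNormParent i,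
          (pvHop_eq_some_iff ..).mpr ⟨hine, rfl, hpne, w, hw, hwne⟩, m, hpath⟩⟩
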